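-- pv_equiv track=rewrite | github.com/Mogul-Hype-Index-source/Hype-index | scripts/v1_data.py | _pick_best_release_date
-- ===== SOURCE A (Python) =====
-- from typing import Any, Dict, List, Optional, Set
--
-- def _pick_best_release_date(release_dates: Optional[List[Dict[str, str]]]) -> Optional[str]:
--     """
--     V1 movies.json has per-country release dates. We prefer the US date
--     when present, otherwise the earliest date across all listed
--     countries (to match TMDb's "primary" release date behaviour).
--     """
--     if not release_dates:
--         return None
--     # Prefer US
--     for rd in release_dates:
--         if rd.get("country") == "US" and rd.get("date"):
--             return rd["date"]
--     # Else earliest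
--     parsed = sorted(rd.get("date") or "" for rd in release_dates if rd.get("date"))
--     return parsed[0] if parsed else None
-- ===== SOURCE B (Python) =====
-- def _pick_best_release_date(release_dates):
--     if not release_dates:
--         return None
--     us = None
--     earliest = None
--     for rd in release_dates:
--         date = rd.get("date")
--         if not date:
--             continue
--         if us is None and rd.get("country") == "US":
--             us = date
--         if earliest is None or date < earliest:
--             earliest = date
--     return us if us is not None else earliest
-- ===== Notes on version B (the rewrite author's own statement) =====
-- stated objective: simpler
-- what changed: Replaces the two-phase US-scan plus sort-whole-list-and-take-head with one linear pass keeping two accumulators: the first US date and the running lexicographic minimum.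
import Mathlib
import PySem

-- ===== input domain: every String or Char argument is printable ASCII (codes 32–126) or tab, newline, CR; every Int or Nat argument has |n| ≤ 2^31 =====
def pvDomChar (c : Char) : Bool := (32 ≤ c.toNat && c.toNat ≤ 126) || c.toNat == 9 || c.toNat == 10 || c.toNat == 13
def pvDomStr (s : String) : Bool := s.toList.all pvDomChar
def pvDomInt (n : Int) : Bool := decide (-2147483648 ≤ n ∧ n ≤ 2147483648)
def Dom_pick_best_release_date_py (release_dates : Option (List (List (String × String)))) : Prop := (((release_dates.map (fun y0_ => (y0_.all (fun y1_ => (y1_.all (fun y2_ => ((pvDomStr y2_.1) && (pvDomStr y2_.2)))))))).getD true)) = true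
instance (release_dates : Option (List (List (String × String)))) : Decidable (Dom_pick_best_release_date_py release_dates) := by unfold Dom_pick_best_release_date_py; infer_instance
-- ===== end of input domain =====

-- B replaces A's US-scan followed by sorting all dates with a single pass keeping
-- two accumulators (first US date, running minimum); objective: simpler.

-- rd.get(k) on the association-list dict (first match), shared by both ports
def pvGet (rd : List (String × String)) (k : String) : Option String :=
  (rd.find? (fun p => p.1 == k)).map (fun p => p.2)

-- truthiness of rd.get("date") (None and "" are falsy)
def pvTruthy (o : Option String) : Bool := o.getD "" != ""

-- ===== PORT A =====
-- the 'for rd in release_dates: if rd.get("country")=="US" and rd.get("date"): return rd["date"]' loop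
def pvUsScan : List (List (String × String)) → Option String
  | [] => none
  | rd :: rest =>
      if (pvGet rd "country" == some "US") && pvTruthy (pvGet rd "date") then
        some ((pvGet rd "date").getD "")
      else pvUsScan rest

def pick_best_release_date_py (release_dates : Option (List (List (String × String)))) : Option String :=
  match release_dates with
  | none => none
  | some rds =>
    if rds.isEmpty then none
    else
      match pvUsScan rds with
      | some d => some d
      | none =>
        -- parsed = sorted(rd.get("date") or "" for rd in release_dates if rd.get("date"))
        let parsed := PySem.List.sorted
          ((rds.filter (fun rd => pvTruthy (pvGet rd "date"))).map
            (fun rd => (pvGet rd "date").getD "")) (fun x => x) false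
        parsed.head?

-- ===== PORT B =====
-- one iteration of Source B's loop body over the state (us, earliest)
def pvBStep (st : Option String × Option String) (rd : List (String × String)) :
    Option String × Option String :=
  match pvGet rd "date" with
  | none => st
  | some d =>
    if d = "" then st
    else
      let us := if st.1 = none ∧ (pvGet rd "country" == some "US") then some d else st.1
      let e := match st.2 with
        | none => some d
        | some e0 => if d < e0 then some d else some e0
      (us, e)

def pick_best_release_date_py_alt (release_dates : Option (List (List (String × String)))) : Option String :=
  match release_dates with
  | none => none
  | some rds =>
    if rds.isEmpty then none
    else
      let st := rds.foldl pvBStep (none, none)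
      match st.1 with
      | some u => some u
      | none => st.2

-- ===== PRECONDITION & SPEC =====
def Spec_pick_best_release_date_py (release_dates : Option (List (List (String × String)))) (out : Option String) : Prop := out = pick_best_release_date_py_alt release_dates
instance (release_dates : Option (List (List (String × String)))) (out : Option String) : Decidable (Spec_pick_best_release_date_py release_dates out) := by unfold Spec_pick_best_release_date_py; infer_instance

-- ===== CLAIM (what is proved, stated in full; the proofs are below) =====
def Claim_equal_pick_best_release_date_py : Prop := ∀ (release_dates : Option (List (List (String × String)))), Dom_pick_best_release_date_py release_dates → Spec_pick_best_release_date_py release_dates (pick_best_release_date_py release_dates)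

-- ===== LEMMAS AND PROOFS =====

-- the truthy dates, in order, as A's generator produces them
def pvDates (rds : List (List (String × String))) : List String :=
  (rds.filter (fun rd => pvTruthy (pvGet rd "date"))).map (fun rd => (pvGet rd "date").getD "")

-- B's earliest-accumulator step, isolated
def pvMinStep (e : Option String) (d : String) : Option String :=
  match e with
  | none => some d
  | some e0 => if d < e0 then some d else some e0

theorem pvFold_fst_some (rds : List (List (String × String))) (u : String) (e : Option String) :
    (rds.foldl pvBStep (some u, e)).1 = some u := by
  induction rds generalizing e with
  | nil => rfl
  | cons rd rest ih =>
    simp only [List.foldl_cons, pvBStep]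
    cases h : pvGet rd "date" with
    | none => exact ih e
    | some d =>
      by_cases hd : d = "" <;> simp [hd] <;> exact ih _

theorem pvFold_fst_none (rds : List (List (String × String))) (e : Option String) :
    (rds.foldl pvBStep (none, e)).1 = pvUsScan rds := by
  induction rds generalizing e with
  | nil => rfl
  | cons rd rest ih =>
    simp only [List.foldl_cons, pvBStep, pvUsScan]
    cases h : pvGet rd "date" with
    | none => simp [pvTruthy, ih e]
    | some d =>
      by_cases hd : d = ""
      · simp [hd, pvTruthy, ih e]
      · by_cases hc : (pvGet rd "country" == some "US") = true
        · simp [hd, hc, pvTruthy, pvFold_fst_some]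
        · simp only [Bool.not_eq_true] at hc
          simp [hd, hc, pvTruthy, ih]

theorem pvDates_cons_skip (rd : List (String × String)) (rest : List (List (String × String)))
    (h : pvTruthy (pvGet rd "date") = false) : pvDates (rd :: rest) = pvDates rest := by
  simp [pvDates, h]

theorem pvDates_cons_keep (rd : List (String × String)) (rest : List (List (String × String)))
    (h : pvTruthy (pvGet rd "date") = true) :
    pvDates (rd :: rest) = ((pvGet rd "date").getD "") :: pvDates rest := by
  simp [pvDates, h]

theorem pvFold_snd (rds : List (List (String × String))) (u e) :
    (rds.foldl pvBStep (u, e)).2 = (pvDates rds).foldl pvMinStep e := by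
  induction rds generalizing u e with
  | nil => rfl
  | cons rd rest ih =>
    simp only [List.foldl_cons, pvBStep]
    cases h : pvGet rd "date" with
    | none =>
      rw [pvDates_cons_skip rd rest (by simp [pvTruthy, h])]
      exact ih u e
    | some d =>
      by_cases hd : d = ""
      · rw [pvDates_cons_skip rd rest (by simp [pvTruthy, h, hd])]
        simp only [hd]
        exact ih u e
      · rw [pvDates_cons_keep rd rest (by simp [pvTruthy, h, hd])]
        simp only [hd, List.foldl_cons]
        have he : (match e with
            | none => some d
            | some e0 => if d < e0 then some d else some e0) = pvMinStep e ((pvGet rd "date").getD "") := by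
          cases e <;> simp [pvMinStep, h]
        rw [he]
        exact ih _ _

theorem pvMinFold_some (l : List String) (a : String) :
    l.foldl pvMinStep (some a) = some (l.foldl min a) := by
  induction l generalizing a with
  | nil => rfl
  | cons d t ih =>
    simp only [List.foldl_cons, pvMinStep]
    by_cases h : d < a
    · rw [if_pos h, ih]
      congr 1
      rw [min_eq_right (le_of_lt h)]
    · rw [if_neg h, ih]
      congr 1
      rw [min_eq_left (le_of_not_gt h)]

theorem pvMinFold_eq_min? (l : List String) :
    l.foldl pvMinStep none = PySem.List.min? l (fun x => x) := by
  cases l with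
  | nil => rfl
  | cons x t =>
    rw [PySem.List.min?_id_cons]
    simpa [pvMinStep] using pvMinFold_some t x

theorem pvHead_sorted_eq_min? (l : List String) :
    (PySem.List.sorted l (fun x => x) false).head? = PySem.List.min? l (fun x => x) := by
  cases h : PySem.List.sorted l (fun x => x) false with
  | nil =>
    have hl : l = [] := (PySem.List.sorted_eq_nil_iff l (fun x => x) false).mp h
    subst hl; rfl
  | cons m t =>
    have hl : l ≠ [] := by
      intro hl; subst hl; simp [PySem.List.sorted] at h
    obtain ⟨mn, hmn⟩ : ∃ mn, PySem.List.min? l (fun x => x) = some mn := by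
      cases hm : PySem.List.min? l (fun x => x) with
      | none => exact absurd ((PySem.List.min?_eq_none_iff l (fun x => x)).mp hm) hl
      | some mn => exact ⟨mn, rfl⟩
    have hmem : mn ∈ l := PySem.List.min?_mem hmn
    have hmmem : m ∈ l := by
      have := (PySem.List.sorted_perm l (fun x => x) false).mem_iff (a := m)
      rw [h] at this
      exact this.mp List.mem_cons_self
    have h1 : m ≤ mn := PySem.List.key_head_sorted_le l (fun x => x) h mn hmem
    have h2 : mn ≤ m := PySem.List.min?_isMin hmn m hmmem
    rw [List.head?_cons, hmn, le_antisymm h1 h2]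

-- ===== VERDICT (by name: the statement is the Claim_ definition above) =====
theorem pick_best_release_date_py_spec : Claim_equal_pick_best_release_date_py := by
  intro release_dates _
  unfold Spec_pick_best_release_date_py pick_best_release_date_py pick_best_release_date_py_alt
  cases release_dates with
  | none => rfl
  | some rds =>
    by_cases he : rds.isEmpty
    · simp [he]
    · simp only [he]
      have h1 := pvFold_fst_none rds none
      have h2 := pvFold_snd rds (none : Option String) none
      cases hu : pvUsScan rds with
      | some d =>
        rw [hu] at h1
        simp [h1]
      | none =>
        rw [hu] at h1
        simp only [h1, h2, pvMinFold_eq_min?, pvHead_sorted_eq_min?, pvDates]
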